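-- pv_equiv track=rewrite | github.com/alejandroJaramillo87/digital-symbiosis | src/linux_system/temporal/event_extraction/causal_analyzer.py | _entities_are_related
-- ===== SOURCE A (Python) =====
-- def _entities_are_related(entity1: str, entity2: str) -> bool:
--     """Check if entities are related."""
--     # GPU entities
--     gpu_entities = ['gpu:', 'nvidia:', 'rtx_5090']
--     if any(gpu in entity1 for gpu in gpu_entities) and any(gpu in entity2 for gpu in gpu_entities):
--         return True
--
--     # Process entities
--     if 'process:' in entity1 and 'process:' in entity2:
--         # Same process or parent-child relationship
--         return True
--
--     # Python environment entities
--     if ('package:' in entity1 or 'virtual_env:' in entity1) and \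
--        ('package:' in entity2 or 'virtual_env:' in entity2):
--         return True
--
--     return False
-- ===== SOURCE B (Python) =====
-- def _category_set(entity: str) -> frozenset:
--     """Classify one entity string independently into the set of category ids it belongs to."""
--     cats = set()
--     for cat_id, markers in enumerate((('gpu:', 'nvidia:', 'rtx_5090'),
--                                       ('process:',),
--                                       ('package:', 'virtual_env:'))):
--         if any(m in entity for m in markers):
--             cats.add(cat_id)
--     return frozenset(cats)
--
--
-- def _entities_are_related(entity1: str, entity2: str) -> bool:
--     """Two entities are related iff their independently computed category sets intersect."""
--     return not _category_set(entity1).isdisjoint(_category_set(entity2))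
-- ===== Notes on version B (the rewrite author's own statement) =====
-- stated objective: alternative
-- what changed: B classifies each entity string independently into a set of category ids and then tests set intersection, instead of A's three pairwise branch checks that probe both strings together per branch.
import Mathlib
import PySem

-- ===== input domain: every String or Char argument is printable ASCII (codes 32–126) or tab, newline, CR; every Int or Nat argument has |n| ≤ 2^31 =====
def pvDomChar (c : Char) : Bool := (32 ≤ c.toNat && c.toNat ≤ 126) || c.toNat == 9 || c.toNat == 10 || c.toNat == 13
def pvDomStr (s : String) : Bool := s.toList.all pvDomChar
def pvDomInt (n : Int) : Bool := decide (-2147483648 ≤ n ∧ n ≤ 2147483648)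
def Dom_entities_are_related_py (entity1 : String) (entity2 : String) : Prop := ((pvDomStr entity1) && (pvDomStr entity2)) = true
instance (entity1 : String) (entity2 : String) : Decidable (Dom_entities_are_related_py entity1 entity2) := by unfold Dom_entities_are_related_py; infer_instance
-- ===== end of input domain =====

-- B classifies each entity independently into a set of category ids and tests set intersection, instead of A's three pairwise branches (alternative decomposition; same cost).


-- ===== PORT A =====
-- Literal port of A: three sequential if-branches over substring tests.
def entities_are_related_py (entity1 : String) (entity2 : String) : Bool :=
  let gpu_entities : List String := ["gpu:", "nvidia:", "rtx_5090"]
  if gpu_entities.any (fun g => PySem.Str.isIn g entity1) &&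
     gpu_entities.any (fun g => PySem.Str.isIn g entity2) then
    true
  else if PySem.Str.isIn "process:" entity1 && PySem.Str.isIn "process:" entity2 then
    true
  else if (PySem.Str.isIn "package:" entity1 || PySem.Str.isIn "virtual_env:" entity1) &&
          (PySem.Str.isIn "package:" entity2 || PySem.Str.isIn "virtual_env:" entity2) then
    true
  else
    false

-- ===== PORT B =====
-- B-side helper: classify ONE entity into the set of category ids it belongs to.
def categorySetB (entity : String) : PySem.Set Int :=
  (PySem.List.enumerate ([["gpu:", "nvidia:", "rtx_5090"], ["process:"], ["package:", "virtual_env:"]] : List (List String))).foldl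
    (fun cats (p : Int × List String) =>
      if p.2.any (fun m => PySem.Str.isIn m entity) then PySem.Set.add cats (p.1) else cats)
    PySem.Set.empty

-- Port of B: compute both category sets independently, then test non-disjointness.
def entities_are_related_py_alt (entity1 : String) (entity2 : String) : Bool :=
  let c1 := categorySetB entity1
  let c2 := categorySetB entity2
  !(PySem.Set.isdisjoint c1 c2)

-- ===== PRECONDITION & SPEC =====
def Spec_entities_are_related_py (entity1 : String) (entity2 : String) (out : Bool) : Prop := out = entities_are_related_py_alt entity1 entity2
instance (entity1 : String) (entity2 : String) (out : Bool) : Decidable (Spec_entities_are_related_py entity1 entity2 out) := by unfold Spec_entities_are_related_py; infer_instance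

-- ===== CLAIM (what is proved, stated in full; the proofs are below) =====
def Claim_equal_entities_are_related_py : Prop := ∀ (entity1 : String) (entity2 : String), Dom_entities_are_related_py entity1 entity2 → Spec_entities_are_related_py entity1 entity2 (entities_are_related_py entity1 entity2)

-- ===== LEMMAS AND PROOFS =====
-- The category-id list categorySetB produces, written as an explicit append of singletons.
def catListB (g p q : Bool) : List Int :=
  (if g then [0] else []) ++ (if p then [1] else []) ++ (if q then [2] else [])

theorem catSetB_eq (entity : String) :
    categorySetB entity =
      catListB
        (PySem.Str.isIn "gpu:" entity || (PySem.Str.isIn "nvidia:" entity || PySem.Str.isIn "rtx_5090" entity))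
        (PySem.Str.isIn "process:" entity)
        (PySem.Str.isIn "package:" entity || PySem.Str.isIn "virtual_env:" entity) := by
  unfold categorySetB
  simp only [PySem.List.enumerate_cons, PySem.List.enumerate_nil, List.any_cons, List.any_nil, Bool.or_false,
    List.foldl_cons, List.foldl_nil]
  generalize (PySem.Str.isIn "gpu:" entity || (PySem.Str.isIn "nvidia:" entity || PySem.Str.isIn "rtx_5090" entity)) = g
  generalize PySem.Str.isIn "process:" entity = p
  generalize (PySem.Str.isIn "package:" entity || PySem.Str.isIn "virtual_env:" entity) = q
  cases g <;> cases p <;> cases q <;>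
    simp [catListB, PySem.Set.add, PySem.Set.empty, PySem.Set.contains]

theorem isdisjoint_catListB (g1 p1 q1 g2 p2 q2 : Bool) :
    (!(PySem.Set.isdisjoint (catListB g1 p1 q1) (catListB g2 p2 q2)))
      = (g1 && g2 || (p1 && p2 || q1 && q2)) := by
  cases g1 <;> cases p1 <;> cases q1 <;> cases g2 <;> cases p2 <;> cases q2 <;>
    simp [catListB, PySem.Set.isdisjoint]

-- ===== VERDICT (by name: the statement is the Claim_ definition above) =====
theorem entities_are_related_py_spec : Claim_equal_entities_are_related_py := by
  intro entity1 entity2 _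
  unfold Spec_entities_are_related_py
  show entities_are_related_py entity1 entity2
      = !(PySem.Set.isdisjoint (categorySetB entity1) (categorySetB entity2))
  rw [catSetB_eq entity1, catSetB_eq entity2, isdisjoint_catListB]
  unfold entities_are_related_py
  simp only [List.any_cons, List.any_nil, Bool.or_false]
  generalize PySem.Str.isIn "gpu:" entity1 = a1
  generalize PySem.Str.isIn "gpu:" entity2 = a2
  generalize PySem.Str.isIn "nvidia:" entity1 = b1
  generalize PySem.Str.isIn "nvidia:" entity2 = b2
  generalize PySem.Str.isIn "rtx_5090" entity1 = c1
  generalize PySem.Str.isIn "rtx_5090" entity2 = c2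
  generalize PySem.Str.isIn "process:" entity1 = d1
  generalize PySem.Str.isIn "process:" entity2 = d2
  generalize PySem.Str.isIn "package:" entity1 = e1
  generalize PySem.Str.isIn "package:" entity2 = e2
  generalize PySem.Str.isIn "virtual_env:" entity1 = f1
  generalize PySem.Str.isIn "virtual_env:" entity2 = f2
  revert a1 a2 b1 b2 c1 c2 d1 d2 e1 e2 f1 f2
  decide
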